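-- pv_equiv track=rewrite | github.com/EvoEvolver/StudentAgent | student/input_gen/generate_mol_definition.py | get_intramol_string
-- ===== SOURCE A (Python) =====
-- def get_intramol_string( n_vdw: int, n_coulomb: int, interactions: dict) -> str:
--     """
--     Generates a formatted string for the IntraVDW and IntraCoulomb sections of the molecule.def file.
--     """
--     lines = []
--     if n_vdw > 0:
--         lines.append("# Intra VDW: atom n1-n2")
--         for (i, j), info in sorted(interactions.items()):
--             if info['classification'] == 'vdw':
--                 lines.append(f"{i} {j}")
--
--     if n_coulomb > 0:
--         lines.append("# Intra Coulomb: atom n1-n2")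
--         for (i, j), info in sorted(interactions.items()):
--             if info['classification'] == 'coulomb':
--                 lines.append(f"{i} {j}")
--
--     return "\n".join(lines)
-- ===== SOURCE B (Python) =====
-- def get_intramol_string(n_vdw: int, n_coulomb: int, interactions: dict) -> str:
--     vdw_pairs, coulomb_pairs = [], []
--     for (i, j), info in sorted(interactions.items()):
--         c = info.get('classification')
--         if c == 'vdw':
--             vdw_pairs.append(f"{i} {j}")
--         elif c == 'coulomb':
--             coulomb_pairs.append(f"{i} {j}")
--     lines = []
--     if n_vdw > 0:
--         lines += ["# Intra VDW: atom n1-n2"] + vdw_pairs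
--     if n_coulomb > 0:
--         lines += ["# Intra Coulomb: atom n1-n2"] + coulomb_pairs
--     return "\n".join(lines)
-- ===== Notes on version B (the rewrite author's own statement) =====
-- stated objective: simpler
-- what changed: B sorts the items once and in a single pass buckets pair strings into vdw/coulomb lists via info.get (no KeyError), then assembles the headed sections, instead of A's per-section re-sort and re-scan.
import Mathlib
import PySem

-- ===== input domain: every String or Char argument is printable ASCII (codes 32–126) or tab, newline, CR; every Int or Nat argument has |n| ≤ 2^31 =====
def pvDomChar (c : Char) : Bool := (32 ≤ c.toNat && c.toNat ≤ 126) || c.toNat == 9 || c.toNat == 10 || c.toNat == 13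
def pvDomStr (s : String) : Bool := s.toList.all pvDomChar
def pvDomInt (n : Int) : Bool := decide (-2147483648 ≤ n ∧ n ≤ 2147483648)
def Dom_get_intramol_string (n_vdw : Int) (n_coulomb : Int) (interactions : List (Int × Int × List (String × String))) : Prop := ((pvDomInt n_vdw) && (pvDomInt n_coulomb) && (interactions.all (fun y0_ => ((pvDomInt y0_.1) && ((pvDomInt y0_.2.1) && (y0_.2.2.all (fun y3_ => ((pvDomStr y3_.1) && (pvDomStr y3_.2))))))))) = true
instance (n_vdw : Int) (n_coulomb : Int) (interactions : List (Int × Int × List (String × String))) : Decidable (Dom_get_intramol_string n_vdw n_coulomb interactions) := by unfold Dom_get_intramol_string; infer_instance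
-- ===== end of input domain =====

-- ===== PORT A =====
-- B differs from A by one sorted pass bucketing pairs into two lists instead of two per-section re-sort-and-scan passes (objective: simpler).
-- Both Pythons receive `interactions` as a dict of dicts; the shared helpers below build those dicts from the assoc lists
-- (overwrite-in-place, exactly Python's dict(...)) and sort the items. Sorting by the (i, j) key tuple alone is exact:
-- dict keys are distinct, so Python's tuple comparison of (key, value) pairs never reaches the value.
def pvItems (interactions : List (Int × Int × List (String × String))) :
    List ((Int × Int) × List (String × String)) :=
  PySem.List.sorted2
    (PySem.Dict.ofList (interactions.map (fun e => ((e.1, e.2.1), e.2.2)))).items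
    (fun p => p.1.1) (fun p => p.1.2) false

-- info['classification'] / info.get('classification') : first build the inner dict, then look up.
def pvCls (info : List (String × String)) : Option String :=
  PySem.Dict.get? (PySem.Dict.ofList info) "classification"

def pvPairStr (p : (Int × Int) × List (String × String)) : String :=
  PySem.Int.toStr p.1.1 ++ " " ++ PySem.Int.toStr p.1.2

def get_intramol_string (n_vdw : Int) (n_coulomb : Int) (interactions : List (Int × Int × List (String × String))) : String :=
  let lines : List String := []
  let lines :=
    if n_vdw > 0 then
      (pvItems interactions).foldl
        (fun acc p => if pvCls p.2 == some "vdw" then acc ++ [pvPairStr p] else acc)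
        (lines ++ ["# Intra VDW: atom n1-n2"])
    else lines
  let lines :=
    if n_coulomb > 0 then
      (pvItems interactions).foldl
        (fun acc p => if pvCls p.2 == some "coulomb" then acc ++ [pvPairStr p] else acc)
        (lines ++ ["# Intra Coulomb: atom n1-n2"])
    else lines
  PySem.Str.join "\n" lines

-- ===== PORT B =====
def get_intramol_string_alt (n_vdw : Int) (n_coulomb : Int) (interactions : List (Int × Int × List (String × String))) : String :=
  let pairs : List String × List String :=
    (pvItems interactions).foldl
      (fun (acc : List String × List String) p =>
        let c := pvCls p.2
        if c == some "vdw" then (acc.1 ++ [pvPairStr p], acc.2)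
        else if c == some "coulomb" then (acc.1, acc.2 ++ [pvPairStr p])
        else acc)
      ([], [])
  let lines : List String :=
    (if n_vdw > 0 then ["# Intra VDW: atom n1-n2"] ++ pairs.1 else [])
      ++ (if n_coulomb > 0 then ["# Intra Coulomb: atom n1-n2"] ++ pairs.2 else [])
  PySem.Str.join "\n" lines

-- ===== PRECONDITION & SPEC =====
-- Pre_ excludes exactly the inputs where Python A raises KeyError: some section is requested (n_vdw > 0 or
-- n_coulomb > 0) and a surviving entry's info dict has no 'classification' key.
def Pre_get_intramol_string (n_vdw : Int) (n_coulomb : Int) (interactions : List (Int × Int × List (String × String))) : Prop :=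
  (0 < n_vdw ∨ 0 < n_coulomb) →
    ∀ p ∈ (PySem.Dict.ofList (interactions.map (fun e => ((e.1, e.2.1), e.2.2)))).items,
      (PySem.Dict.ofList p.2).contains "classification" = true
instance (n_vdw : Int) (n_coulomb : Int) (interactions : List (Int × Int × List (String × String))) : Decidable (Pre_get_intramol_string n_vdw n_coulomb interactions) := by unfold Pre_get_intramol_string; infer_instance

def pvWitness_get_intramol_string : Int × Int × (List (Int × Int × List (String × String))) :=
  (1, 1, [(1, 2, [("classification", "vdw")]), (2, 3, [("classification", "coulomb")])])

def Spec_get_intramol_string (n_vdw : Int) (n_coulomb : Int) (interactions : List (Int × Int × List (String × String))) (out : String) : Prop := out = get_intramol_string_alt n_vdw n_coulomb interactions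
instance (n_vdw : Int) (n_coulomb : Int) (interactions : List (Int × Int × List (String × String))) (out : String) : Decidable (Spec_get_intramol_string n_vdw n_coulomb interactions out) := by unfold Spec_get_intramol_string; infer_instance

-- ===== CLAIM (what is proved, stated in full; the proofs are below) =====
def Claim_equal_get_intramol_string : Prop := ∀ (n_vdw : Int) (n_coulomb : Int) (interactions : List (Int × Int × List (String × String))), Dom_get_intramol_string n_vdw n_coulomb interactions → Pre_get_intramol_string n_vdw n_coulomb interactions → Spec_get_intramol_string n_vdw n_coulomb interactions (get_intramol_string n_vdw n_coulomb interactions)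

-- ===== LEMMAS AND PROOFS =====

-- B's single bucketing pass computes, componentwise, the two single-section folds.
theorem pv_pairFold (L : List ((Int × Int) × List (String × String))) (a b : List String) :
    L.foldl
      (fun (acc : List String × List String) p =>
        let c := pvCls p.2
        if c == some "vdw" then (acc.1 ++ [pvPairStr p], acc.2)
        else if c == some "coulomb" then (acc.1, acc.2 ++ [pvPairStr p])
        else acc)
      (a, b)
    = (L.foldl (fun acc p => if pvCls p.2 == some "vdw" then acc ++ [pvPairStr p] else acc) a,
       L.foldl (fun acc p => if pvCls p.2 == some "coulomb" then acc ++ [pvPairStr p] else acc) b) := by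
  induction L generalizing a b with
  | nil => rfl
  | cons x t ih =>
    by_cases hv : pvCls x.2 == some "vdw"
    · have hc : (pvCls x.2 == some "coulomb") = false := by
        revert hv; cases pvCls x.2 <;> simp_all
      simp only [List.foldl_cons, hv, hc, if_true, Bool.false_eq_true,
        if_false]
      exact ih _ _
    · by_cases hc : pvCls x.2 == some "coulomb"
      · simp only [Bool.not_eq_true] at hv
        simp only [List.foldl_cons, hv, hc, if_true, Bool.false_eq_true,
          if_false]
        exact ih _ _
      · simp only [Bool.not_eq_true] at hv hc
        simp only [List.foldl_cons, hv, hc, Bool.false_eq_true, if_false]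
        exact ih _ _

-- ===== VERDICT (by name: the statement is the Claim_ definition above) =====
theorem get_intramol_string_spec : Claim_equal_get_intramol_string := by
  intro n_vdw n_coulomb interactions _ _
  unfold Spec_get_intramol_string get_intramol_string get_intramol_string_alt
  simp only [pv_pairFold, PySem.List.foldl_append_if]
  split_ifs <;> simp
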